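-- pv_equiv track=rewrite | github.com/Rampagy/CrossCribbage | ComputeScore.py | ScoreFlush
-- ===== SOURCE A (Python) =====
-- def ScoreFlush(row):
--     spade_count = 0
--     diamond_count = 0
--     heart_count = 0
--     club_count = 0
--     unplaced_count = 0
--
--     for i in range(0, len(row)):
--         if ((row[i] <= 13) and (row[i] >= 1)):
--             spade_count += 1
--         elif ((row[i] <= 26) and (row[i] >= 14)):
--             club_count += 1
--         elif ((row[i] <= 39) and (row[i] >= 27)):
--             heart_count += 1
--         elif ((row[i] <= 52) and (row[i] >= 40)):
--             diamond_count += 1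
--         else:
--             unplaced_count += 1
--
--     score = 0
--     if (spade_count >= 5) or (club_count >= 5) or (heart_count >= 5) or (diamond_count >= 5):
--         score = 5
--
--     return score
-- ===== SOURCE B (Python) =====
-- def ScoreFlush(row):
--     suits = sorted((c - 1) // 13 for c in row if 1 <= c <= 52)
--     if any(a == b for a, b in zip(suits, suits[4:])):
--         return 5
--     return 0
-- ===== Notes on version B (the rewrite author's own statement) =====
-- stated objective: alternative
-- what changed: Instead of maintaining four per-suit counters in one pass and testing each against 5, B maps valid cards to suit indices, SORTS them, and scans the sorted list for a width-4 window with equal endpoints (suits[i] == suits[i+4]), which holds iff some suit occurs at least 5 times.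
import Mathlib
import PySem

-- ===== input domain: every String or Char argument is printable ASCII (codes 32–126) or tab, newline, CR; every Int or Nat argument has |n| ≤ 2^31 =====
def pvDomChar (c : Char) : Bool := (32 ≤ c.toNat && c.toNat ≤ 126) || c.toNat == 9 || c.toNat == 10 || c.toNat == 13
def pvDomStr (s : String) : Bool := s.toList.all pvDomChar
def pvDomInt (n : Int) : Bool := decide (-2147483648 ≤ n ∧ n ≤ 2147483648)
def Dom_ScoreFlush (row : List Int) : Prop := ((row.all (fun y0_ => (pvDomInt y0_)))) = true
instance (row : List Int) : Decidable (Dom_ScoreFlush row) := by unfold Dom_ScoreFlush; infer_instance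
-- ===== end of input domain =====

-- B replaces A's one-pass four-counter tally by sort-then-scan: map valid cards to suit
-- indices, sort, and look for a width-4 window with equal endpoints (alternative algorithm).

-- ===== PORT A =====
-- loop body of A: state (spade, club, heart, diamond, unplaced)
def pvStepA (t : Int × Int × Int × Int × Int) (x : Int) : Int × Int × Int × Int × Int :=
  let (s, c, h, d, u) := t
  if x ≤ 13 ∧ 1 ≤ x then (s + 1, c, h, d, u)
  else if x ≤ 26 ∧ 14 ≤ x then (s, c + 1, h, d, u)
  else if x ≤ 39 ∧ 27 ≤ x then (s, c, h + 1, d, u)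
  else if x ≤ 52 ∧ 40 ≤ x then (s, c, h, d + 1, u)
  else (s, c, h, d, u + 1)

def ScoreFlush (row : List Int) : Int :=
  let st := row.foldl pvStepA (0, 0, 0, 0, 0)
  if st.1 ≥ 5 ∨ st.2.1 ≥ 5 ∨ st.2.2.1 ≥ 5 ∨ st.2.2.2.1 ≥ 5 then 5 else 0

-- ===== PORT B =====
-- suits = sorted((c - 1) // 13 for c in row if 1 <= c <= 52)
-- return 5 if any(a == b for a, b in zip(suits, suits[4:])) else 0
def ScoreFlush_alt (row : List Int) : Int :=
  let suits := PySem.List.sorted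
      ((row.filter (fun c => decide (1 ≤ c ∧ c ≤ 52))).map (fun c => PySem.Int.floordiv (c - 1) 13))
      (fun v => v) false
  if (suits.zip (PySem.List.slice suits (some 4) none)).any (fun p => p.1 == p.2) then 5 else 0

-- ===== PRECONDITION & SPEC =====
def Spec_ScoreFlush (row : List Int) (out : Int) : Prop := out = ScoreFlush_alt row
instance (row : List Int) (out : Int) : Decidable (Spec_ScoreFlush row out) := by unfold Spec_ScoreFlush; infer_instance

-- ===== CLAIM (what is proved, stated in full; the proofs are below) =====
def Claim_equal_ScoreFlush : Prop := ∀ (row : List Int), Dom_ScoreFlush row → Spec_ScoreFlush row (ScoreFlush row)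

-- ===== LEMMAS AND PROOFS =====

-- the multiset of suit indices B sorts
def pvSuits (row : List Int) : List Int :=
  (row.filter (fun c => decide (1 ≤ c ∧ c ≤ 52))).map (fun c => PySem.Int.floordiv (c - 1) 13)

-- A's loop computes the four per-range counts (plus the else-bucket)
lemma pv_foldA (row : List Int) : ∀ (t : Int × Int × Int × Int × Int),
    row.foldl pvStepA t =
      (t.1 + (row.countP (fun x => decide (1 ≤ x ∧ x ≤ 13)) : Int),
       t.2.1 + (row.countP (fun x => decide (14 ≤ x ∧ x ≤ 26)) : Int),
       t.2.2.1 + (row.countP (fun x => decide (27 ≤ x ∧ x ≤ 39)) : Int),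
       t.2.2.2.1 + (row.countP (fun x => decide (40 ≤ x ∧ x ≤ 52)) : Int),
       t.2.2.2.2 + (row.countP (fun x => decide (¬(1 ≤ x ∧ x ≤ 52))) : Int)) := by
  induction row with
  | nil => intro t; simp
  | cons x xs ih =>
      intro t
      obtain ⟨s, c, h, d, u⟩ := t
      rw [List.foldl_cons, List.countP_cons, List.countP_cons, List.countP_cons,
        List.countP_cons, List.countP_cons]
      simp only [pvStepA]
      split_ifs <;> rw [ih] <;>
        simp only [decide_eq_true_eq, Prod.mk.injEq] at * <;>
        refine ⟨?_, ?_, ?_, ?_, ?_⟩ <;> (push_cast; omega)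

-- counting a suit index in pvSuits is counting the corresponding card range in row
lemma pv_count_suit (row : List Int) (v : Int) (hv0 : 0 ≤ v) (hv3 : v ≤ 3) :
    (pvSuits row).count v = row.countP (fun x => decide (13 * v + 1 ≤ x ∧ x ≤ 13 * v + 13)) := by
  unfold pvSuits
  rw [List.count_eq_countP, List.countP_map, List.countP_filter]
  apply List.countP_congr
  intro x _
  simp only [Function.comp, decide_eq_true_eq, Bool.and_eq_true, beq_iff_eq]
  rw [PySem.Int.floordiv_eq_ediv_of_pos (by norm_num)]
  constructor
  · rintro ⟨h1, h2, h3⟩; omega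
  · intro h; omega

-- every element of pvSuits is a suit index 0..3
lemma pv_suits_mem (row : List Int) {v : Int} (hv : v ∈ pvSuits row) : 0 ≤ v ∧ v ≤ 3 := by
  unfold pvSuits at hv
  obtain ⟨c, hc, rfl⟩ := List.mem_map.mp hv
  have := List.of_mem_filter hc
  simp only [decide_eq_true_eq] at this
  rw [PySem.Int.floordiv_eq_ediv_of_pos (by norm_num)]
  omega

-- monotone access to a ≤-sorted list
lemma pv_mono (l : List Int) (hs : l.Pairwise (· ≤ ·)) {i j : Nat} (hij : i ≤ j)
    (hj : j < l.length) : l[i]'(by omega) ≤ l[j] := by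
  rcases Nat.lt_or_ge i j with h | h
  · exact List.pairwise_iff_getElem.mp hs i j (by omega) hj h
  · have : i = j := by omega
    subst this; exact le_refl _

-- the window test on a sorted list detects exactly 'some value occurs ≥ 5 times'
lemma pv_window_iff (l : List Int) (hs : l.Pairwise (· ≤ ·)) :
    ((l.zip (l.drop 4)).any (fun p => p.1 == p.2) = true) ↔ ∃ v, 5 ≤ l.count v := by
  constructor
  · intro h
    obtain ⟨p, hp, hpe⟩ := List.any_eq_true.mp h
    obtain ⟨i, hi, rfl⟩ := List.mem_iff_getElem.mp hp
    rw [List.length_zip, List.length_drop] at hi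
    have hi4 : i + 4 < l.length := by omega
    rw [List.getElem_zip] at hpe
    simp only [beq_iff_eq, List.getElem_drop] at hpe
    have hpe2 : l[i]'(by omega) = l[i + 4]'(by omega) := by
      simpa [Nat.add_comm] using hpe
    clear hpe
    -- l[i] = l[i+4]; the window l[i..i+4] is constant, so its value occurs ≥ 5 times
    refine ⟨l[i]'(by omega), ?_⟩
    have hsub : List.Sublist ((l.drop i).take 5) l :=
      ((l.drop i).take_sublist 5).trans (l.drop_sublist i)
    have hlen : ((l.drop i).take 5).length = 5 := by
      rw [List.length_take, List.length_drop]; omega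
    have hall : ∀ b ∈ (l.drop i).take 5, l[i]'(by omega) = b := by
      intro b hb
      obtain ⟨k, hk, rfl⟩ := List.mem_iff_getElem.mp hb
      rw [hlen] at hk
      rw [List.getElem_take, List.getElem_drop]
      have h1 : l[i]'(by omega) ≤ l[i + k]'(by omega) := pv_mono l hs (by omega) (by omega)
      have h2 : l[i + k]'(by omega) ≤ l[i + 4]'(by omega) := pv_mono l hs (by omega) (by omega)
      omega
    have hc5 : ((l.drop i).take 5).count (l[i]'(by omega)) = 5 :=
      (List.count_eq_length.mpr hall).trans hlen
    have := hsub.count_le (l[i]'(by omega))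
    omega
  · rintro ⟨v, hv⟩
    have hvmem : v ∈ l := List.count_pos_iff.mp (by omega)
    have hil : l.idxOf v < l.length := List.idxOf_lt_length_of_mem hvmem
    set i := l.idxOf v with hidef
    have hiv : l[i] = v := List.getElem_idxOf hil
    -- no v before the first occurrence, so all ≥ 5 copies sit in l.drop i
    have htake : (l.take i).count v = 0 := by
      rw [List.count_eq_zero]
      intro hmem
      have := ((l.take_prefix i).mem_iff_idxOf_lt_length v).mp hmem
      rw [List.length_take] at this
      omega
    have hdrop : 5 ≤ (l.drop i).count v := by
      have hca : (l.take i ++ l.drop i).count v = (l.take i).count v + (l.drop i).count v :=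
        List.count_append
      rw [List.take_append_drop] at hca
      omega
    -- at most 4 of them fit in the first 4 slots of l.drop i, so one sits at offset ≥ 4
    have hd4 : 1 ≤ ((l.drop i).drop 4).count v := by
      have hsplit : ((l.drop i).take 4 ++ (l.drop i).drop 4).count v =
          ((l.drop i).take 4).count v + ((l.drop i).drop 4).count v := List.count_append
      rw [List.take_append_drop] at hsplit
      have hb : ((l.drop i).take 4).count v ≤ 4 := by
        calc ((l.drop i).take 4).count v ≤ ((l.drop i).take 4).length :=
              List.count_le_length
          _ ≤ 4 := by simp
      omega
    have hvmem4 : v ∈ (l.drop i).drop 4 := List.count_pos_iff.mp (by omega)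
    obtain ⟨k, hk, hkv⟩ := List.mem_iff_getElem.mp hvmem4
    rw [List.length_drop, List.length_drop] at hk
    rw [List.getElem_drop, List.getElem_drop] at hkv
    -- sandwich: l[i] = v = l[i+(4+k)] forces l[i+4] = v, giving the window hit at index i
    have hm1 : l[i] ≤ l[i + 4]'(by omega) := pv_mono l hs (by omega) (by omega)
    have hm2 : l[i + 4]'(by omega) ≤ l[i + (4 + k)]'(by omega) :=
      pv_mono l hs (by omega) (by omega)
    rw [List.any_eq_true]
    refine ⟨(l[i]'(by omega), l[i + 4]'(by omega)), ?_, by simp; omega⟩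
    rw [List.mem_iff_getElem]
    refine ⟨i, ?_, ?_⟩
    · rw [List.length_zip, List.length_drop]; omega
    · simp [List.getElem_zip, List.getElem_drop, Nat.add_comm]

-- ===== VERDICT (by name: the statement is the Claim_ definition above) =====
theorem ScoreFlush_spec : Claim_equal_ScoreFlush := by
  intro row _
  show ScoreFlush row = ScoreFlush_alt row
  unfold ScoreFlush ScoreFlush_alt
  simp only [pv_foldA row (0, 0, 0, 0, 0)]
  set l := PySem.List.sorted
      ((row.filter (fun c => decide (1 ≤ c ∧ c ≤ 52))).map (fun c => PySem.Int.floordiv (c - 1) 13))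
      (fun v => v) false with hldef
  rw [show PySem.List.slice l (some 4) none = l.drop 4 from by simp [pysem]]
  have hperm : l.Perm (pvSuits row) := PySem.List.sorted_perm _ _ _
  have hpw : l.Pairwise (· ≤ ·) := by
    have := PySem.List.sorted_pairwise
      (xs := (row.filter (fun c => decide (1 ≤ c ∧ c ≤ 52))).map (fun c => PySem.Int.floordiv (c - 1) 13))
      (key := fun v => v)
    exact this
  have hiff : ((l.zip (l.drop 4)).any (fun p => p.1 == p.2) = true) ↔
      (∃ v, 5 ≤ (pvSuits row).count v) := by
    rw [pv_window_iff l hpw]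
    constructor
    · rintro ⟨v, hv⟩; exact ⟨v, by rw [← hperm.count_eq]; exact hv⟩
    · rintro ⟨v, hv⟩; exact ⟨v, by rw [hperm.count_eq]; exact hv⟩
  have hdisj : (∃ v, 5 ≤ (pvSuits row).count v) ↔
      (5 ≤ row.countP (fun x => decide (1 ≤ x ∧ x ≤ 13)) ∨
       5 ≤ row.countP (fun x => decide (14 ≤ x ∧ x ≤ 26)) ∨
       5 ≤ row.countP (fun x => decide (27 ≤ x ∧ x ≤ 39)) ∨
       5 ≤ row.countP (fun x => decide (40 ≤ x ∧ x ≤ 52))) := by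
    constructor
    · rintro ⟨v, hv⟩
      have hvm : v ∈ pvSuits row := List.count_pos_iff.mp (by omega)
      obtain ⟨hb0, hb3⟩ := pv_suits_mem row hvm
      have hcv := pv_count_suit row v (by omega) (by omega)
      interval_cases v <;>
        [left; (right; left); (right; right; left); (right; right; right)] <;>
        · rw [hcv] at hv
          calc 5 ≤ _ := hv
            _ ≤ _ := Nat.le_of_eq (List.countP_congr (by intro x _; simp only [decide_eq_true_eq]; omega))
    · intro h
      rcases h with h | h | h | h
      · exact ⟨0, by rw [pv_count_suit _ _ (by norm_num) (by norm_num)]; calc 5 ≤ _ := h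
          _ ≤ _ := Nat.le_of_eq (List.countP_congr (by intro x _; simp only [decide_eq_true_eq]; omega))⟩
      · exact ⟨1, by rw [pv_count_suit _ _ (by norm_num) (by norm_num)]; calc 5 ≤ _ := h
          _ ≤ _ := Nat.le_of_eq (List.countP_congr (by intro x _; simp only [decide_eq_true_eq]; omega))⟩
      · exact ⟨2, by rw [pv_count_suit _ _ (by norm_num) (by norm_num)]; calc 5 ≤ _ := h
          _ ≤ _ := Nat.le_of_eq (List.countP_congr (by intro x _; simp only [decide_eq_true_eq]; omega))⟩
      · exact ⟨3, by rw [pv_count_suit _ _ (by norm_num) (by norm_num)]; calc 5 ≤ _ := h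
          _ ≤ _ := Nat.le_of_eq (List.countP_congr (by intro x _; simp only [decide_eq_true_eq]; omega))⟩
  by_cases hB : (l.zip (l.drop 4)).any (fun p => p.1 == p.2) = true
  · rw [if_pos hB, if_pos]
    have := hdisj.mp (hiff.mp hB)
    omega
  · rw [if_neg hB, if_neg]
    intro hA
    apply hB
    apply hiff.mpr
    apply hdisj.mpr
    omega
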